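-- pv_equiv track=rewrite | github.com/domiee13/dungcaythuattoan | CodeSignal/htmlEndTagByStartTag.py | htmlEndTagByStartTag
-- ===== SOURCE A (Python) =====
-- def htmlEndTagByStartTag(startTag):
--
--     result = ['<', '/']
--     position = 1
--     while position<len(startTag.split()[0]) and startTag[position]!='>':
--         result.append(startTag[position])
--         position += 1
--     result.append('>')
--     return ''.join(result)
-- ===== SOURCE B (Python) =====
-- def htmlEndTagByStartTag(startTag):
--     n = len(startTag.split()[0])
--     head = startTag[1:n]
--     i = head.find('>')
--     name = head if i == -1 else head[:i]
--     return '</' + name + '>'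
-- ===== Notes on version B (the rewrite author's own statement) =====
-- stated objective: faster
-- what changed: Replaces the character-by-character while-loop (which re-splits the string to recompute len(startTag.split()[0]) on every iteration) with a single locate-then-slice computation: slice startTag[1:n] once, find the first '>' in it, and slice the tag name out.
import Mathlib
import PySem

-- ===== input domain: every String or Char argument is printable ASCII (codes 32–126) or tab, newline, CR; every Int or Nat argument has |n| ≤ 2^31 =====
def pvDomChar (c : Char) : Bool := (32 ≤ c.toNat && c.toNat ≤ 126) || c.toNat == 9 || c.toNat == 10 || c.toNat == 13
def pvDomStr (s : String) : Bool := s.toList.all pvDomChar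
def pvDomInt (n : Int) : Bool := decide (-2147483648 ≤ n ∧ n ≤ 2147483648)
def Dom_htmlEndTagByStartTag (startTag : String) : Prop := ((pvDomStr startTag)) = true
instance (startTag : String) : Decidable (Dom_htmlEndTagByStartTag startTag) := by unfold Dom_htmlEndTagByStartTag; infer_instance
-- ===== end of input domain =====

-- B replaces A's character-by-character while-loop accumulation with locate-then-slice
-- (slice startTag[1:n], find the first '>' in it, slice the name out); same return value everywhere A returns.

-- ===== PORT A =====
-- A's while loop: position starts at 1; while position < len(startTag.split()[0]) and
-- startTag[position] != '>', append startTag[position].  Since len(split()[0]) ≤ len(startTag)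
-- always, the index startTag[position] is always in range, so pyGetD is exact here.
def pvLoopA (cs : List Char) (n : Nat) (position : Nat) (result : List Char) : List Char :=
  if position < n ∧ PySem.List.pyGetD cs (position : Int) ' ' ≠ '>' then
    pvLoopA cs n (position + 1) (result ++ [PySem.List.pyGetD cs (position : Int) ' '])
  else result
termination_by n - position

def htmlEndTagByStartTag (startTag : String) : String :=
  match PySem.List.pyGet? (PySem.Chars.split₀ startTag.toList) 0 with
  | none => ""   -- Python raises IndexError here (whitespace-only input); excluded by Pre_
  | some tok => String.ofList (pvLoopA startTag.toList tok.length 1 ['<', '/'] ++ ['>'])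

-- ===== PORT B =====
def htmlEndTagByStartTag_alt (startTag : String) : String :=
  match PySem.List.pyGet? (PySem.Chars.split₀ startTag.toList) 0 with
  | none => ""   -- Python raises IndexError here (whitespace-only input); excluded by Pre_
  | some tok =>
    let head := PySem.List.slice startTag.toList (some 1) (some (tok.length : Int))
    let i := PySem.Chars.find head ['>']
    let name := if i = -1 then head else PySem.List.slice head none (some i)
    String.ofList ('<' :: '/' :: name ++ ['>'])

-- ===== PRECONDITION & SPEC =====
-- A raises IndexError on startTag.split()[0] exactly when the input has no non-whitespace character (B raises there too).
def Pre_htmlEndTagByStartTag (startTag : String) : Prop :=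
  PySem.Chars.split₀ startTag.toList ≠ []
instance (startTag : String) : Decidable (Pre_htmlEndTagByStartTag startTag) := by
  unfold Pre_htmlEndTagByStartTag; infer_instance
def pvWitness_htmlEndTagByStartTag : String := "<div>"

def Spec_htmlEndTagByStartTag (startTag : String) (out : String) : Prop := out = htmlEndTagByStartTag_alt startTag
instance (startTag : String) (out : String) : Decidable (Spec_htmlEndTagByStartTag startTag out) := by unfold Spec_htmlEndTagByStartTag; infer_instance

-- ===== CLAIM (what is proved, stated in full; the proofs are below) =====
def Claim_equal_htmlEndTagByStartTag : Prop := ∀ (startTag : String), Dom_htmlEndTagByStartTag startTag → Pre_htmlEndTagByStartTag startTag → Spec_htmlEndTagByStartTag startTag (htmlEndTagByStartTag startTag)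

-- ===== LEMMAS AND PROOFS =====

-- every word produced by split₀.go is a stored word of acc or fits inside cur ++ rest
lemma pvGoLen (s : List Char) : ∀ (cur : List Char) (acc : List (List Char)) (t : List Char),
    t ∈ PySem.Chars.split₀.go s cur acc → t ∈ acc ∨ t.length ≤ cur.length + s.length := by
  induction s with
  | nil =>
    intro cur acc t ht
    rw [PySem.Chars.split₀.go.eq_def] at ht
    by_cases hc : cur.isEmpty = true <;> simp [hc] at ht
    · exact Or.inl ht
    · rcases ht with h | h
      · exact Or.inl h
      · right; simp [h]
  | cons c rest ih =>
    intro cur acc t ht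
    rw [PySem.Chars.split₀.go.eq_def] at ht
    by_cases hw : PySem.Chars.isspace c = true <;> simp only [hw, if_true] at ht
    · by_cases hc : cur.isEmpty = true <;> simp only [hc, if_true] at ht
      · rcases ih [] acc t ht with h | h
        · exact Or.inl h
        · right; simp at h ⊢; omega
      · rcases ih [] (cur.reverse :: acc) t ht with h | h
        · rcases List.mem_cons.1 h with h | h
          · right; simp [h]
          · exact Or.inl h
        · right; simp at h ⊢; omega
    · rcases ih (c :: cur) acc t ht with h | h
      · exact Or.inl h
      · right; simp at h ⊢; omega

-- the first word of s.split() is no longer than s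
lemma pvTokLen (s tok : List Char) (h : (PySem.Chars.split₀ s).head? = some tok) :
    tok.length ≤ s.length := by
  have hm : tok ∈ PySem.Chars.split₀ s := List.mem_of_mem_head? h
  rcases pvGoLen s [] [] tok hm with h' | h'
  · cases h'
  · simpa using h'

-- find.go for the single-character pattern ['>']
lemma pvFindGo (l : List Char) : ∀ k : Nat,
    PySem.Chars.find.go ['>'] l k =
      if '>' ∈ l then ((k + (l.takeWhile (· ≠ '>')).length : Nat) : Int) else -1 := by
  induction l with
  | nil => intro k; simp [PySem.Chars.find.go]
  | cons c rest ih =>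
    intro k
    rw [PySem.Chars.find.go.eq_def]
    by_cases hc : c = '>'
    · subst hc; simp [List.isPrefixOf]
    · simp only [List.isPrefixOf, hc, Bool.false_and, beq_iff_eq, if_false, ih (k+1)]
      simp [hc, List.takeWhile_cons, Ne.symm hc]
      split_ifs with h
      · push_cast; omega
      · rfl

-- B's name computation is takeWhile (· ≠ '>')
lemma pvName (l : List Char) :
    (if PySem.Chars.find l ['>'] = -1 then l
     else PySem.List.slice l none (some (PySem.Chars.find l ['>']))) = l.takeWhile (· ≠ '>') := by
  have hf : PySem.Chars.find l ['>'] =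
      if '>' ∈ l then (((l.takeWhile (· ≠ '>')).length : Nat) : Int) else -1 := by
    simpa using pvFindGo l 0
  by_cases h : '>' ∈ l
  · rw [hf]; simp [h, PySem.List.slice_to_natCast]
    exact (List.prefix_iff_eq_take.mp (List.takeWhile_prefix _)).symm
  · rw [hf]; simp [h]
    exact (List.takeWhile_eq_self_iff.2 (by intro x hx; simp; rintro rfl; exact h hx)).symm

-- A's loop characterised: it appends the (≠ '>')-prefix of cs[position:n]
lemma pvLoopA_eq (cs : List Char) (n : Nat) (hn : n ≤ cs.length) :
    ∀ (position : Nat) (result : List Char),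
      pvLoopA cs n position result =
        result ++ ((cs.drop position).take (n - position)).takeWhile (· ≠ '>') := by
  intro position result
  fun_induction pvLoopA cs n position result with
  | case1 position result hcond ih =>
    obtain ⟨hlt, hne⟩ := hcond
    have hplen : position < cs.length := lt_of_lt_of_le hlt hn
    have hget : PySem.List.pyGetD cs (position : Int) ' ' = cs[position] := by
      rw [PySem.List.pyGetD_natCast]; exact List.getD_eq_getElem _ _ hplen
    rw [ih]
    rw [List.drop_eq_getElem_cons hplen]
    have : n - position = (n - (position + 1)) + 1 := by omega
    rw [this, List.take_succ_cons, List.takeWhile_cons]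
    simp [hget, hne, hget ▸ hne]
  | case2 position result hcond =>
    by_cases hlt : position < n
    · have hne : PySem.List.pyGetD cs (position : Int) ' ' = '>' := by
        by_contra h; exact hcond ⟨hlt, h⟩
      have hplen : position < cs.length := lt_of_lt_of_le hlt hn
      have hget : cs[position] = '>' := by
        rw [PySem.List.pyGetD_natCast] at hne; rw [← List.getD_eq_getElem _ ' ' hplen]; exact hne
      rw [List.drop_eq_getElem_cons hplen]
      have : n - position = (n - (position + 1)) + 1 := by omega
      rw [this, List.take_succ_cons, List.takeWhile_cons]
      simp [hget]
    · have : n - position = 0 := by omega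
      simp [this]

-- the two ports agree on every input (the none branch agrees trivially)
lemma pvMain (startTag : String) :
    htmlEndTagByStartTag startTag = htmlEndTagByStartTag_alt startTag := by
  unfold htmlEndTagByStartTag htmlEndTagByStartTag_alt
  cases hget : PySem.List.pyGet? (PySem.Chars.split₀ startTag.toList) 0 with
  | none => rfl
  | some tok =>
    simp only []
    have hhead : (PySem.Chars.split₀ startTag.toList).head? = some tok := by
      cases hs : PySem.Chars.split₀ startTag.toList with
      | nil => rw [hs] at hget; simp [PySem.List.pyGet?, PySem.List.pyIdx?] at hget
      | cons a l =>
        rw [hs] at hget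
        simp [PySem.List.pyGet?, PySem.List.pyIdx?] at hget
        simp [hget]
    have hn : tok.length ≤ startTag.toList.length := pvTokLen _ _ hhead
    have hslice : PySem.List.slice startTag.toList (some 1) (some (tok.length : Int)) =
        (startTag.toList.drop 1).take (tok.length - 1) := by
      rw [show (1:Int) = ((1:Nat):Int) by norm_num, PySem.List.slice_natCast]
    rw [pvLoopA_eq _ _ hn, hslice, pvName]
    simp

-- ===== VERDICT (by name: the statement is the Claim_ definition above) =====
theorem htmlEndTagByStartTag_spec : Claim_equal_htmlEndTagByStartTag := by
  intro startTag _ _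
  unfold Spec_htmlEndTagByStartTag
  exact pvMain startTag
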